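-- pv_equiv track=rewrite | github.com/alexarmstrongvi/AdventOfCode | 2024/day02/main.py | _is_tolerable_report_increasing
-- ===== SOURCE A (Python) =====
-- from collections.abc import Sequence
--
-- def _is_tolerable_report_increasing(nums: Sequence[int]) -> bool:
--     '''
--     Examples
--     ========
--     >>> _is_tolerable_report_increasing([1,2,4,7])
--     True
--     >>> _is_tolerable_report_increasing([1,2,3,9])
--     True
--     >>> _is_tolerable_report_increasing([9,1,2,3])
--     True
--     >>> _is_tolerable_report_increasing([9,1,2,9])
--     False
--     '''
--     found_bad_level = False
--     is_safe = lambda x, y: 1 <= y-x <= 3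
--     i = 0
--     while i+1 < len(nums):
--         if is_safe(nums[i], nums[i+1]):
--             i += 1
--             continue
--         elif found_bad_level:
--             return False
--         elif i+2 == len(nums):
--             return True
--         found_bad_level = True
--
--         # Determine if i or i+1 should be dropped
--         if is_safe(nums[i], nums[i+2]): # drop i+1
--             i += 2
--             continue
--         elif i == 0 and is_safe(nums[i+1], nums[i+2]): # drop i
--             i += 2
--             continue
--         elif i != 0 and is_safe(nums[i-1], nums[i+1]): # drop i
--             i += 1
--             continue
--         return False
--     return True
-- ===== SOURCE B (Python) =====
-- def _is_tolerable_report_increasing(nums) -> bool: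
--     def ok(seq):
--         return all(1 <= y - x <= 3 for x, y in zip(seq, seq[1:]))
--     if ok(nums):
--         return True
--     return any(ok(nums[:k] + nums[k + 1:]) for k in range(len(nums)))
-- ===== Notes on version B (the rewrite author's own statement) =====
-- stated objective: simpler
-- what changed: Replaces the greedy one-pass repair loop (index jumps and a found_bad_level flag) with the declarative check: the report is safe as-is, or safe after deleting some single index k.
import Mathlib
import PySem

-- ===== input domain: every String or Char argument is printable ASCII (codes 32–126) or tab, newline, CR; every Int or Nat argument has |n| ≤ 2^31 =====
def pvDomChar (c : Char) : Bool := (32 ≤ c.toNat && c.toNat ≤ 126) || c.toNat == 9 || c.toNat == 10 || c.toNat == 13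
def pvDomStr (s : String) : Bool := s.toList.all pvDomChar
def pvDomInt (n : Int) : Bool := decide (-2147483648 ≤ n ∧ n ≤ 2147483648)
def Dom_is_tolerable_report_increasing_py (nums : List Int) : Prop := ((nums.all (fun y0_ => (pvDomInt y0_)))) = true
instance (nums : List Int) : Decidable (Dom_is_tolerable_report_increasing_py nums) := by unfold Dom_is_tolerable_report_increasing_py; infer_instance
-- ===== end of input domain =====

-- B replaces A's greedy one-pass repair with the declarative "safe as-is or safe after one deletion" check (simpler, not faster).


-- ===== PORT A =====
-- is_safe(x, y) = 1 <= y-x <= 3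
def pvSafe (x y : Int) : Bool := (1 ≤ y - x) && (y - x ≤ 3)

-- the while loop of A, state = (i, found_bad_level); indices i, i±1, i+2 are nonnegative and
-- (on every path that reads them) in range, so List.getD is exact for Python's nums[...] here
def pvLoopA (nums : List Int) (found : Bool) (i : Nat) : Bool :=
  if _h : i + 1 < nums.length then
    if pvSafe (nums.getD i 0) (nums.getD (i+1) 0) then pvLoopA nums found (i+1)
    else if found then false
    else if i + 2 = nums.length then true
    else
      if pvSafe (nums.getD i 0) (nums.getD (i+2) 0) then pvLoopA nums true (i+2)
      else if i = 0 && pvSafe (nums.getD (i+1) 0) (nums.getD (i+2) 0) then pvLoopA nums true (i+2)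
      else if i ≠ 0 && pvSafe (nums.getD (i-1) 0) (nums.getD (i+1) 0) then pvLoopA nums true (i+1)
      else false
  else true
termination_by nums.length - i

def is_tolerable_report_increasing_py (nums : List Int) : Bool :=
  pvLoopA nums false 0

-- ===== PORT B =====
-- ok(seq) = all(1 <= y-x <= 3 for x, y in zip(seq, seq[1:]))
def pvOk (seq : List Int) : Bool :=
  (seq.zip (seq.drop 1)).all (fun p => (1 ≤ p.2 - p.1) && (p.2 - p.1 ≤ 3))

def is_tolerable_report_increasing_py_alt (nums : List Int) : Bool :=
  if pvOk nums then true
  else (List.range nums.length).any (fun k => pvOk (nums.take k ++ nums.drop (k+1)))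

-- ===== PRECONDITION & SPEC =====
def Spec_is_tolerable_report_increasing_py (nums : List Int) (out : Bool) : Prop := out = is_tolerable_report_increasing_py_alt nums
instance (nums : List Int) (out : Bool) : Decidable (Spec_is_tolerable_report_increasing_py nums out) := by unfold Spec_is_tolerable_report_increasing_py; infer_instance

-- ===== CLAIM (what is proved, stated in full; the proofs are below) =====
def Claim_equal_is_tolerable_report_increasing_py : Prop := ∀ (nums : List Int), Dom_is_tolerable_report_increasing_py nums → Spec_is_tolerable_report_increasing_py nums (is_tolerable_report_increasing_py nums)

-- ===== LEMMAS AND PROOFS =====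

-- chain form of pvOk, convenient for induction
def okC : List Int → Bool
  | x :: y :: t => pvSafe x y && okC (y :: t)
  | _ => true

lemma pvOk_eq_okC (l : List Int) : pvOk l = okC l := by
  induction l with
  | nil => rfl
  | cons x t ih =>
    cases t with
    | nil => rfl
    | cons y t' =>
      have h1 : pvOk (x :: y :: t') = (pvSafe x y && pvOk (y :: t')) := by
        simp [pvOk, pvSafe, Bool.and_assoc]
      rw [h1, ih, okC]

lemma okC_short (l : List Int) (h : l.length ≤ 1) : okC l = true := by
  match l, h with
  | [], _ => rfl
  | [_], _ => rfl

-- the split law: pairs of u ++ a :: v = pairs of u ++ [a] plus pairs of a :: v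
lemma okC_split (u : List Int) (a : Int) (v : List Int) :
    okC (u ++ a :: v) = (okC (u ++ [a]) && okC (a :: v)) := by
  induction u with
  | nil => simp [okC_short]
  | cons x u' ih =>
    cases u' with
    | nil => simp [okC]
    | cons x' u'' =>
      simp only [List.cons_append, okC] at ih ⊢
      rw [ih, Bool.and_assoc]

-- A = B, clean form of the RHS
def altC (l : List Int) : Bool :=
  okC l || (List.range l.length).any (fun k => okC (l.take k ++ l.drop (k+1)))

lemma altC_of_okC {l : List Int} (h : okC l = true) : altC l = true := by
  simp [altC, h]

lemma altC_of_del {l : List Int} (k : Nat) (hk : k < l.length)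
    (h : okC (l.take k ++ l.drop (k+1)) = true) : altC l = true := by
  simp only [altC, Bool.or_eq_true, List.any_eq_true]
  exact Or.inr ⟨k, List.mem_range.mpr hk, h⟩

lemma take_drop_lt (u : List Int) (rest : List Int) (k : Nat) (hk : k < u.length) :
    (u ++ rest).take k ++ (u ++ rest).drop (k+1) = (u.take k ++ u.drop (k+1)) ++ rest := by
  rw [List.take_append_of_le_length (by omega), List.drop_append_of_le_length (by omega),
    List.append_assoc]

lemma take_drop_ge (u : List Int) (rest : List Int) (k : Nat) (hk : u.length ≤ k) :
    (u ++ rest).take k ++ (u ++ rest).drop (k+1) =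
      u ++ (rest.take (k - u.length) ++ rest.drop (k - u.length + 1)) := by
  rw [List.take_append, List.drop_append, List.take_of_length_le hk,
    List.drop_eq_nil_of_le (show u.length ≤ k + 1 by omega),
    show k + 1 - u.length = k - u.length + 1 by omega, List.append_assoc, List.nil_append]

-- a bad adjacent pair anywhere kills okC
lemma okC_bad (u : List Int) (x y : Int) (v : List Int) (hb : pvSafe x y = false) :
    okC (u ++ x :: y :: v) = false := by
  rw [show (u ++ x :: y :: v) = (u ++ [x]) ++ y :: v by simp,
    okC_split (u ++ [x]) y v]
  rw [show (u ++ [x]) ++ [y] = u ++ x :: [y] by simp, okC_split u x [y]]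
  simp [okC, hb]

-- scan form of A's loop on the unscanned suffix; prev = element before the suffix (none at the start)
def scanA (prev : Option Int) : List Int → Bool
  | x :: y :: t =>
    if pvSafe x y then scanA (some x) (y :: t)
    else
      match t with
      | [] => true
      | c :: t' =>
        if pvSafe x c then okC (c :: t')
        else
          match prev with
          | none => if pvSafe y c then okC (c :: t') else false
          | some p => if pvSafe p y then okC (y :: c :: t') else false
  | _ => true

lemma scanA_nil (prev : Option Int) : scanA prev [] = true := by rw [scanA.eq_def]

lemma scanA_one (prev : Option Int) (a : Int) : scanA prev [a] = true := by rw [scanA.eq_def]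

lemma scanA_safe (prev : Option Int) (x y : Int) (t : List Int) (hs : pvSafe x y = true) :
    scanA prev (x :: y :: t) = scanA (some x) (y :: t) := by
  rw [scanA.eq_def]; simp [hs]

lemma scanA_two_bad (prev : Option Int) (x y : Int) (hs : pvSafe x y = false) :
    scanA prev [x, y] = true := by
  rw [scanA.eq_def]; simp [hs]

lemma scanA_bad3_xc (prev : Option Int) (x y c : Int) (t' : List Int)
    (hs : pvSafe x y = false) (hxc : pvSafe x c = true) :
    scanA prev (x :: y :: c :: t') = okC (c :: t') := by
  rw [scanA.eq_def]; simp [hs, hxc]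

lemma scanA_bad3_none (x y c : Int) (t' : List Int)
    (hs : pvSafe x y = false) (hxc : pvSafe x c = false) :
    scanA none (x :: y :: c :: t') = if pvSafe y c then okC (c :: t') else false := by
  rw [scanA.eq_def]; simp [hs, hxc]

lemma scanA_bad3_some (p x y c : Int) (t' : List Int)
    (hs : pvSafe x y = false) (hxc : pvSafe x c = false) :
    scanA (some p) (x :: y :: c :: t') = if pvSafe p y then okC (y :: c :: t') else false := by
  rw [scanA.eq_def]; simp [hs, hxc]

-- the suffix from j, decomposed at its first element
lemma drop_cons (nums : List Int) (j : Nat) (h : j < nums.length) :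
    nums.drop j = nums.getD j 0 :: nums.drop (j+1) := by
  rw [List.drop_eq_getElem_cons h, List.getD_eq_getElem nums 0 h]

-- found = true: the loop just checks the remaining adjacent pairs
lemma loopA_true (nums : List Int) (i : Nat) :
    pvLoopA nums true i = okC (nums.drop i) := by
  rw [pvLoopA]
  by_cases h : i + 1 < nums.length
  · rw [dif_pos h, drop_cons nums i (by omega), drop_cons nums (i+1) h, okC]
    cases hs : pvSafe (nums.getD i 0) (nums.getD (i+1) 0) with
    | true =>
      rw [loopA_true nums (i+1), drop_cons nums (i+1) h]
      simp
    | false =>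
      simp
  · rw [dif_neg h, okC_short _ (by rw [List.length_drop]; omega)]
termination_by nums.length - i

-- found = false: the loop is scanA with prev = the element before index i
lemma loopA_false (nums : List Int) (i : Nat) :
    pvLoopA nums false i = scanA ((nums.take i).getLast?) (nums.drop i) := by
  rw [pvLoopA]
  by_cases h : i + 1 < nums.length
  · have hlast1 : (nums.take (i+1)).getLast? = some (nums.getD i 0) := by
      rw [List.getLast?_eq_getElem?]
      have hl : (nums.take (i+1)).length = i + 1 := by rw [List.length_take]; omega
      rw [hl, Nat.add_sub_cancel, List.getElem?_take_of_lt (by omega),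
        List.getElem?_eq_getElem (by omega), ← List.getD_eq_getElem nums 0 (by omega)]
    rw [dif_pos h, drop_cons nums i (by omega), drop_cons nums (i+1) h,
      show nums.drop (i+1+1) = nums.drop (i+2) from rfl]
    by_cases hs : pvSafe (nums.getD i 0) (nums.getD (i+1) 0) = true
    · rw [scanA_safe _ _ _ _ hs, if_pos hs, loopA_false nums (i+1), drop_cons nums (i+1) h,
        hlast1, show nums.drop (i+1+1) = nums.drop (i+2) from rfl]
    · have hsf : pvSafe (nums.getD i 0) (nums.getD (i+1) 0) = false := by
        revert hs; cases pvSafe (nums.getD i 0) (nums.getD (i+1) 0) <;> simp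
      rw [if_neg hs]
      by_cases hteq : i + 2 = nums.length
      · rw [List.drop_eq_nil_of_le (show nums.length ≤ i + 2 by omega),
          scanA_two_bad _ _ _ hsf]
        simp [hteq]
      · have hlen2 : i + 2 < nums.length := by omega
        rw [loopA_true nums (i+2), loopA_true nums (i+1), drop_cons nums (i+1) h,
          show nums.drop (i+1+1) = nums.drop (i+2) from rfl, drop_cons nums (i+2) hlen2]
        simp only [Bool.false_eq_true, if_false, if_neg hteq]
        by_cases hsc : pvSafe (nums.getD i 0) (nums.getD (i+2) 0) = true
        · rw [scanA_bad3_xc _ _ _ _ _ hsf hsc, if_pos hsc]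
        · have hscf : pvSafe (nums.getD i 0) (nums.getD (i+2) 0) = false := by
            revert hsc; cases pvSafe (nums.getD i 0) (nums.getD (i+2) 0) <;> simp
          rw [if_neg hsc]
          by_cases hi0 : i = 0
          · subst hi0
            simp only [List.take_zero, List.getLast?_nil]
            rw [scanA_bad3_none _ _ _ _ hsf hscf]
            cases hyc : pvSafe (nums.getD (0+1) 0) (nums.getD (0+2) 0) with
            | true => simp
            | false => simp
          · have hlastp : (nums.take i).getLast? = some (nums.getD (i-1) 0) := by
              rw [List.getLast?_eq_getElem?]
              have hl : (nums.take i).length = i := by rw [List.length_take]; omega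
              rw [hl, List.getElem?_take_of_lt (by omega),
                List.getElem?_eq_getElem (by omega),
                ← List.getD_eq_getElem nums 0 (by omega)]
            rw [hlastp, scanA_bad3_some _ _ _ _ _ hsf hscf]
            have hc1 : ¬ ((decide (i = 0) &&
                pvSafe (nums.getD (i+1) 0) (nums.getD (i+2) 0)) = true) := by simp [hi0]
            by_cases hpy : pvSafe (nums.getD (i-1) 0) (nums.getD (i+1) 0) = true
            · have hc2 : (decide (i ≠ 0) &&
                  pvSafe (nums.getD (i-1) 0) (nums.getD (i+1) 0)) = true := by
                rw [hpy]; simp [hi0]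
              rw [if_neg hc1, if_pos hc2, if_pos hpy]
            · have hc2 : ¬ ((decide (i ≠ 0) &&
                  pvSafe (nums.getD (i-1) 0) (nums.getD (i+1) 0)) = true) := by
                intro hcontra; rw [Bool.and_eq_true] at hcontra; exact hpy hcontra.2
              rw [if_neg hc1, if_neg hc2, if_neg hpy]
  · rw [dif_neg h]
    have hlen : (nums.drop i).length ≤ 1 := by rw [List.length_drop]; omega
    match hdr : nums.drop i, hlen with
    | [], _ => rw [scanA_nil]
    | [a], _ => rw [scanA_one]
termination_by nums.length - i

-- deleting an index strictly before the bad pair keeps the bad pair adjacent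
lemma del_lt_keeps (done : List Int) (x y : Int) (v : List Int) (k : Nat)
    (hk : k < done.length) (hb : pvSafe x y = false) :
    okC ((done ++ x :: y :: v).take k ++ (done ++ x :: y :: v).drop (k+1)) = false := by
  rw [take_drop_lt done (x :: y :: v) k hk]
  exact okC_bad _ x y v hb

-- deleting an index strictly after the bad pair keeps it too
lemma del_gt_keeps (done : List Int) (x y : Int) (v : List Int) (k : Nat)
    (hk : done.length + 2 ≤ k) (hb : pvSafe x y = false) :
    okC ((done ++ x :: y :: v).take k ++ (done ++ x :: y :: v).drop (k+1)) = false := by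
  rw [take_drop_ge done (x :: y :: v) k (by omega)]
  obtain ⟨m, hm⟩ : ∃ m, k - done.length = m + 2 := ⟨k - done.length - 2, by omega⟩
  rw [hm]
  have he : (x :: y :: v).take (m+2) ++ (x :: y :: v).drop (m+2+1) =
      x :: y :: (v.take m ++ v.drop (m+1)) := by
    simp
  rw [he]
  exact okC_bad done x y _ hb

-- delete x (index = done.length) from done ++ x :: rest
lemma del_eq (done : List Int) (x : Int) (rest : List Int) :
    (done ++ x :: rest).take done.length ++ (done ++ x :: rest).drop (done.length + 1) =
      done ++ rest := by
  rw [take_drop_ge done (x :: rest) done.length (le_refl _)]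
  simp

-- delete y (index = done.length + 1) from done ++ x :: y :: rest
lemma del_succ (done : List Int) (x y : Int) (rest : List Int) :
    (done ++ x :: y :: rest).take (done.length + 1) ++
      (done ++ x :: y :: rest).drop (done.length + 2) = done ++ x :: rest := by
  have he : done.length + 2 = (done.length + 1) + 1 := rfl
  rw [he, take_drop_ge done (x :: y :: rest) (done.length + 1) (by omega)]
  simp

-- MAIN: the scan computes B's predicate, given the scanned prefix is all-safe
lemma scanA_main (rest : List Int) : ∀ (done : List Int),
    okC (done ++ rest.take 1) = true →
    scanA done.getLast? rest = altC (done ++ rest) := by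
  induction rest with
  | nil =>
    intro done hp
    simp only [List.take_nil, List.append_nil] at hp
    rw [scanA_nil, List.append_nil, altC_of_okC hp]
  | cons x rest' ih =>
    intro done hp
    simp only [List.take_succ_cons, List.take_zero] at hp
    cases rest' with
    | nil =>
      rw [scanA_one, altC_of_okC (by simpa using hp)]
    | cons y t =>
      by_cases hs : pvSafe x y = true
      · -- safe x y: recurse
        rw [scanA_safe _ _ _ _ hs]
        have hpre : okC ((done ++ [x]) ++ (y :: t).take 1) = true := by
          simp only [List.take_succ_cons, List.take_zero]
          rw [show (done ++ [x]) ++ [y] = done ++ x :: [y] by simp, okC_split done x [y]]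
          simp [hp, okC, hs]
        have hihr := ih (done ++ [x]) hpre
        rw [List.getLast?_concat] at hihr
        rw [hihr, List.append_assoc, List.singleton_append]
      · have hsf : pvSafe x y = false := by revert hs; cases pvSafe x y <;> simp
        cases t with
        | nil =>
          -- last pair bad: delete y
          rw [scanA_two_bad _ _ _ hsf]
          have hk : done.length + 1 < (done ++ [x, y]).length := by simp
          have hok : okC ((done ++ [x, y]).take (done.length + 1) ++
              (done ++ [x, y]).drop (done.length + 2)) = true := by
            rw [show done ++ [x, y] = done ++ x :: y :: ([] : List Int) from rfl,
              del_succ done x y []]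
            simpa using hp
          rw [altC_of_del (done.length + 1) hk hok]
        | cons c t' =>
          have hbadfull : okC (done ++ x :: y :: c :: t') = false := okC_bad done x y _ hsf
          by_cases hxc : pvSafe x c = true
          · -- greedy drops y, needing okC (c :: t')
            rw [scanA_bad3_xc _ _ _ _ _ hsf hxc]
            cases hcv : okC (c :: t') with
            | true =>
              have hk : done.length + 1 < (done ++ x :: y :: c :: t').length := by simp
              have hok : okC ((done ++ x :: y :: c :: t').take (done.length + 1) ++
                  (done ++ x :: y :: c :: t').drop (done.length + 2)) = true := by
                rw [del_succ done x y (c :: t'),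
                  okC_split done x (c :: t'), hp, Bool.true_and, okC, hxc, Bool.true_and, hcv]
              rw [altC_of_del (done.length + 1) hk hok]
            | false =>
              symm
              simp only [altC, hbadfull, Bool.false_or]
              rw [List.any_eq_false]
              intro k hkmem
              have hk := List.mem_range.mp hkmem
              simp only [Bool.not_eq_true]
              rcases Nat.lt_or_ge k done.length with h' | h'
              · exact del_lt_keeps done x y (c :: t') k h' hsf
              · rcases Nat.lt_or_ge k (done.length + 2) with h'' | h''
                · rcases (show k = done.length ∨ k = done.length + 1 by omega) with rfl | rfl
                  · rw [del_eq done x (y :: c :: t'), okC_split done y (c :: t')]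
                    simp [okC, hcv]
                  · rw [del_succ done x y (c :: t'), okC_split done x (c :: t')]
                    simp [okC, hcv]
                · exact del_gt_keeps done x y (c :: t') k h'' hsf
          · have hxcf : pvSafe x c = false := by revert hxc; cases pvSafe x c <;> simp
            cases hdone : done.getLast? with
            | none =>
              -- done = []: greedy drops x, requiring safe y c then okC (c :: t')
              have hde : done = [] := List.getLast?_eq_none_iff.mp hdone
              subst hde
              simp only [List.nil_append] at hbadfull hp ⊢
              rw [scanA_bad3_none _ _ _ _ hsf hxcf]
              by_cases hyc : pvSafe y c = true
              · rw [if_pos hyc]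
                cases hcv : okC (c :: t') with
                | true =>
                  have hk : 0 < (x :: y :: c :: t').length := by simp
                  have hok : okC ((x :: y :: c :: t').take 0 ++
                      (x :: y :: c :: t').drop 1) = true := by
                    simp only [List.take_zero, List.nil_append]
                    simp [okC, hyc, hcv]
                  rw [altC_of_del 0 hk hok]
                | false =>
                  symm
                  simp only [altC, hbadfull, Bool.false_or]
                  rw [List.any_eq_false]
                  intro k hkmem
                  have hk := List.mem_range.mp hkmem
                  simp only [Bool.not_eq_true]
                  rcases Nat.lt_or_ge k 2 with h'' | h''
                  · rcases (show k = 0 ∨ k = 1 by omega) with rfl | rfl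
                    · simp only [List.take_zero, List.nil_append]
                      simp [okC, hcv]
                    · have he := del_succ ([] : List Int) x y (c :: t')
                      simp only [List.nil_append, List.length_nil, Nat.zero_add] at he
                      rw [he]
                      simp [okC, hxcf]
                  · have he := del_gt_keeps ([] : List Int) x y (c :: t') k (by simpa using h'') hsf
                    simpa using he
              · have hycf : pvSafe y c = false := by revert hyc; cases pvSafe y c <;> simp
                rw [if_neg hyc]
                symm
                simp only [altC, hbadfull, Bool.false_or]
                rw [List.any_eq_false]
                intro k hkmem
                have hk := List.mem_range.mp hkmem
                simp only [Bool.not_eq_true]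
                rcases Nat.lt_or_ge k 2 with h'' | h''
                · rcases (show k = 0 ∨ k = 1 by omega) with rfl | rfl
                  · simp only [List.take_zero, List.nil_append]
                    simp [okC, hycf]
                  · have he := del_succ ([] : List Int) x y (c :: t')
                    simp only [List.nil_append, List.length_nil, Nat.zero_add] at he
                    rw [he]
                    simp [okC, hxcf]
                · have he := del_gt_keeps ([] : List Int) x y (c :: t') k (by simpa using h'') hsf
                  simpa using he
            | some p =>
              -- done = w ++ [p]: greedy drops x, requiring safe p y then okC (y :: c :: t')
              have hdne : done ≠ [] := by
                intro h'; rw [h'] at hdone; simp at hdone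
              obtain ⟨w, hw⟩ : ∃ w, done = w ++ [p] := by
                refine ⟨done.dropLast, ?_⟩
                have h1 := List.dropLast_concat_getLast hdne
                have h2 := List.getLast?_eq_some_getLast hdne
                rw [hdone] at h2
                rw [← Option.some_inj.mp h2] at h1
                exact h1.symm
              have hsplit : okC (w ++ [p]) = true ∧ pvSafe p x = true := by
                rw [hw] at hp
                rw [show (w ++ [p]) ++ [x] = w ++ p :: [x] by simp, okC_split w p [x]] at hp
                simp only [Bool.and_eq_true, okC, Bool.and_true] at hp
                exact hp
              have hwp := hsplit.1
              rw [scanA_bad3_some _ _ _ _ _ hsf hxcf]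
              by_cases hpy : pvSafe p y = true
              · rw [if_pos hpy]
                cases hcv : okC (y :: c :: t') with
                | true =>
                  -- delete x works
                  have hk : done.length < (done ++ x :: y :: c :: t').length := by simp
                  have hok : okC ((done ++ x :: y :: c :: t').take done.length ++
                      (done ++ x :: y :: c :: t').drop (done.length + 1)) = true := by
                    rw [del_eq done x (y :: c :: t'), hw, List.append_assoc,
                      List.singleton_append, okC_split w p (y :: c :: t'), hwp, Bool.true_and,
                      okC, hpy, Bool.true_and, hcv]
                  rw [altC_of_del done.length hk hok]
                | false =>
                  symm
                  simp only [altC, hbadfull, Bool.false_or]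
                  rw [List.any_eq_false]
                  intro k hkmem
                  have hk := List.mem_range.mp hkmem
                  simp only [Bool.not_eq_true]
                  rcases Nat.lt_or_ge k done.length with h' | h'
                  · exact del_lt_keeps done x y (c :: t') k h' hsf
                  · rcases Nat.lt_or_ge k (done.length + 2) with h'' | h''
                    · rcases (show k = done.length ∨ k = done.length + 1 by omega) with rfl | rfl
                      · rw [del_eq done x (y :: c :: t'), hw, List.append_assoc,
                          List.singleton_append, okC_split w p (y :: c :: t')]
                        have hcv' : (pvSafe y c && okC (c :: t')) = false := by
                          simpa [okC] using hcv
                        simp [okC, hwp, hpy, hcv']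
                      · rw [del_succ done x y (c :: t'), okC_split done x (c :: t')]
                        simp [okC, hxcf]
                    · exact del_gt_keeps done x y (c :: t') k h'' hsf
              · have hpyf : pvSafe p y = false := by revert hpy; cases pvSafe p y <;> simp
                rw [if_neg hpy]
                symm
                simp only [altC, hbadfull, Bool.false_or]
                rw [List.any_eq_false]
                intro k hkmem
                have hk := List.mem_range.mp hkmem
                simp only [Bool.not_eq_true]
                rcases Nat.lt_or_ge k done.length with h' | h'
                · exact del_lt_keeps done x y (c :: t') k h' hsf
                · rcases Nat.lt_or_ge k (done.length + 2) with h'' | h''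
                  · rcases (show k = done.length ∨ k = done.length + 1 by omega) with rfl | rfl
                    · rw [del_eq done x (y :: c :: t'), hw, List.append_assoc,
                        List.singleton_append, okC_split w p (y :: c :: t')]
                      simp [okC, hpyf]
                    · rw [del_succ done x y (c :: t'), okC_split done x (c :: t')]
                      simp [okC, hxcf]
                  · exact del_gt_keeps done x y (c :: t') k h'' hsf

lemma alt_eq_altC (nums : List Int) :
    is_tolerable_report_increasing_py_alt nums = altC nums := by
  unfold is_tolerable_report_increasing_py_alt altC
  rw [pvOk_eq_okC]
  cases h : okC nums with
  | true => simp
  | false =>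
    simp only [Bool.false_eq_true, if_false, Bool.false_or]
    congr 1
    funext k
    rw [pvOk_eq_okC]


-- ===== VERDICT (by name: the statement is the Claim_ definition above) =====
theorem is_tolerable_report_increasing_py_spec : Claim_equal_is_tolerable_report_increasing_py := by
  intro nums _
  unfold Spec_is_tolerable_report_increasing_py is_tolerable_report_increasing_py
  rw [loopA_false nums 0, alt_eq_altC]
  simp only [List.take_zero, List.getLast?_nil, List.drop_zero]
  have hp : okC ([] ++ nums.take 1) = true := by
    rw [List.nil_append]
    exact okC_short _ (by rw [List.length_take]; omega)
  exact scanA_main nums [] hp
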